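-- pv_equiv track=rewrite | github.com/lukeyigechen/optimality-theory-mark | src/ot_util.py | proc_input
-- ===== SOURCE A (Python) =====
-- def proc_input(lines):
--     ur = ''
--     sr = ''
--     cand_list = []
--     sr_stress_encode = ''
--     cand_stress_encode_list = []
--     for line in lines:
--         line = str(line).strip()
--         if line != '' and line[0] != '#':
--             split_line = line.split(':')
--             if split_line[0].lower().strip() == 'ur':
--                 ur = split_line[-1]
--             elif split_line[0].lower().strip() == 'sr':
--                 sr = split_line[-1]
--             elif split_line[0].lower().strip() == 'candidates':
--                 cand_list = split_line[-1].split(',')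
--             elif split_line[0].lower().strip() == 'sr_stress':
--                 sr_stress_encode = split_line[-1]
--             elif split_line[0].lower().strip() == 'candidates_stress':
--                 cand_stress_encode_list = split_line[-1].split(',')
--     return ur, sr, cand_list, sr_stress_encode, cand_stress_encode_list
-- ===== SOURCE B (Python) =====
-- def _last_value(lines, key):
--     # back-to-front search: the first matching line from the end is the last assignment
--     for raw in reversed(lines):
--         line = str(raw).strip()
--         if line != '' and line[0] != '#':
--             parts = line.split(':')
--             if parts[0].lower().strip() == key:
--                 return parts[-1]
--     return None
--
-- def proc_input(lines):
--     ur = _last_value(lines, 'ur')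
--     sr = _last_value(lines, 'sr')
--     cand = _last_value(lines, 'candidates')
--     srs = _last_value(lines, 'sr_stress')
--     cands = _last_value(lines, 'candidates_stress')
--     return ('' if ur is None else ur,
--             '' if sr is None else sr,
--             [] if cand is None else cand.split(','),
--             '' if srs is None else srs,
--             [] if cands is None else cands.split(','))
-- ===== Notes on version B (the rewrite author's own statement) =====
-- stated objective: alternative
-- what changed: Replaces A's single forward pass that mutates five accumulator variables through a five-way if/elif chain with five independent back-to-front searches: for each field, scan the lines in reverse and return the first matching line's value (which is A's last-wins assignment), assembling the tuple afterwards.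
import Mathlib
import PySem

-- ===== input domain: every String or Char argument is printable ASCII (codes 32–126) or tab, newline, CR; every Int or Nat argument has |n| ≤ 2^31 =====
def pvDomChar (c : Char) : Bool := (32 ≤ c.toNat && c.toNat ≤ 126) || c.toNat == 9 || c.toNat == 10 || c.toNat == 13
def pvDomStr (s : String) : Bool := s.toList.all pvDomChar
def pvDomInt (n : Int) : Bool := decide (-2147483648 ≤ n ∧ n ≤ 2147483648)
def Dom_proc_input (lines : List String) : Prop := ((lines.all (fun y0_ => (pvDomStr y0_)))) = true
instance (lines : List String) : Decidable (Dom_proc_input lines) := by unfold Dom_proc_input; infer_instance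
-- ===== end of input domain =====

-- B replaces A's single forward accumulator pass (five-way if/elif) by five independent
-- back-to-front searches, one per field; same asymptotic cost (objective: alternative).

-- ===== PORT A =====
-- s.split(sep): exact for sep ≠ "" (here always ":" or ","), where split? is some
def pySplit (s sep : String) : List String := (PySem.Str.split? s sep).getD [s]

-- one loop iteration of A, updating the five accumulator variables
def procInputStep (st : String × String × List String × String × List String) (raw : String) :
    String × String × List String × String × List String :=
  match st with
  | (ur, sr, cl, ss, cs) =>
    let line := PySem.Str.strip raw
    if line ≠ "" ∧ PySem.Str.pyGet? line 0 ≠ some '#' then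
      let sl := pySplit line ":"
      if PySem.Str.strip (PySem.Str.lower (PySem.List.pyGetD sl 0 "")) = "ur" then
        (PySem.List.pyGetD sl (-1) "", sr, cl, ss, cs)
      else if PySem.Str.strip (PySem.Str.lower (PySem.List.pyGetD sl 0 "")) = "sr" then
        (ur, PySem.List.pyGetD sl (-1) "", cl, ss, cs)
      else if PySem.Str.strip (PySem.Str.lower (PySem.List.pyGetD sl 0 "")) = "candidates" then
        (ur, sr, pySplit (PySem.List.pyGetD sl (-1) "") ",", ss, cs)
      else if PySem.Str.strip (PySem.Str.lower (PySem.List.pyGetD sl 0 "")) = "sr_stress" then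
        (ur, sr, cl, PySem.List.pyGetD sl (-1) "", cs)
      else if PySem.Str.strip (PySem.Str.lower (PySem.List.pyGetD sl 0 "")) = "candidates_stress" then
        (ur, sr, cl, ss, pySplit (PySem.List.pyGetD sl (-1) "") ",")
      else (ur, sr, cl, ss, cs)
    else (ur, sr, cl, ss, cs)

def proc_input (lines : List String) : String × String × List String × String × List String :=
  lines.foldl procInputStep ("", "", [], "", [])

-- ===== PORT B =====
-- B's helper _last_value: first match while scanning the reversed list (applied to lines.reverse)
def lastValue (key : String) : List String → Option String
  | [] => none
  | raw :: rest =>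
    let line := PySem.Str.strip raw
    if line ≠ "" ∧ PySem.Str.pyGet? line 0 ≠ some '#' ∧
        PySem.Str.strip (PySem.Str.lower (PySem.List.pyGetD (pySplit line ":") 0 "")) = key then
      some (PySem.List.pyGetD (pySplit line ":") (-1) "")
    else lastValue key rest

def proc_input_alt (lines : List String) : String × String × List String × String × List String :=
  let rev := lines.reverse
  ((lastValue "ur" rev).getD "",
   (lastValue "sr" rev).getD "",
   (match lastValue "candidates" rev with | some v => pySplit v "," | none => []),
   (lastValue "sr_stress" rev).getD "",
   (match lastValue "candidates_stress" rev with | some v => pySplit v "," | none => []))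

-- ===== PRECONDITION & SPEC =====
def Spec_proc_input (lines : List String) (out : String × String × List String × String × List String) : Prop := out = proc_input_alt lines
instance (lines : List String) (out : String × String × List String × String × List String) : Decidable (Spec_proc_input lines out) := by unfold Spec_proc_input; infer_instance

-- ===== CLAIM (what is proved, stated in full; the proofs are below) =====
def Claim_equal_proc_input : Prop := ∀ (lines : List String), Dom_proc_input lines → Spec_proc_input lines (proc_input lines)

-- ===== LEMMAS AND PROOFS =====

lemma lastValue_cons (key raw : String) (rest : List String) :
    lastValue key (raw :: rest) =
      (if PySem.Str.strip raw ≠ "" ∧ PySem.Str.pyGet? (PySem.Str.strip raw) 0 ≠ some '#' ∧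
          PySem.Str.strip (PySem.Str.lower (PySem.List.pyGetD (pySplit (PySem.Str.strip raw) ":") 0 "")) = key then
        some (PySem.List.pyGetD (pySplit (PySem.Str.strip raw) ":") (-1) "")
      else lastValue key rest) := rfl

-- the fold over the whole list, with any initial state, described per component by lastValue
lemma foldl_eq_lastValue (lines : List String)
    (st : String × String × List String × String × List String) :
    lines.foldl procInputStep st =
      ((lastValue "ur" lines.reverse).getD st.1,
       (lastValue "sr" lines.reverse).getD st.2.1,
       (match lastValue "candidates" lines.reverse with | some v => pySplit v "," | none => st.2.2.1),
       (lastValue "sr_stress" lines.reverse).getD st.2.2.2.1,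
       (match lastValue "candidates_stress" lines.reverse with | some v => pySplit v "," | none => st.2.2.2.2)) := by
  induction lines using List.reverseRecOn generalizing st with
  | nil => rfl
  | append_singleton ls l ih =>
    rw [List.foldl_append, List.foldl_cons, List.foldl_nil, ih, List.reverse_append]
    simp only [List.reverse_cons, List.reverse_nil, List.nil_append, List.singleton_append]
    unfold procInputStep
    by_cases hskip : PySem.Str.strip l ≠ "" ∧ PySem.Str.pyGet? (PySem.Str.strip l) 0 ≠ some '#'
    · obtain ⟨hne, hnh⟩ := hskip
      simp only [if_pos (And.intro hne hnh)]
      simp only [pysem] at hnh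
      by_cases h1 : PySem.Str.strip (PySem.Str.lower (PySem.List.pyGetD (pySplit (PySem.Str.strip l) ":") 0 "")) = "ur"
      · simp [lastValue_cons, PySem.List.pyGet?_zero, h1, hne, hnh]
      by_cases h2 : PySem.Str.strip (PySem.Str.lower (PySem.List.pyGetD (pySplit (PySem.Str.strip l) ":") 0 "")) = "sr"
      · simp [lastValue_cons, PySem.List.pyGet?_zero, h2, hne, hnh]
      by_cases h3 : PySem.Str.strip (PySem.Str.lower (PySem.List.pyGetD (pySplit (PySem.Str.strip l) ":") 0 "")) = "candidates"
      · simp [lastValue_cons, PySem.List.pyGet?_zero, h3, hne, hnh]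
      by_cases h4 : PySem.Str.strip (PySem.Str.lower (PySem.List.pyGetD (pySplit (PySem.Str.strip l) ":") 0 "")) = "sr_stress"
      · simp [lastValue_cons, PySem.List.pyGet?_zero, h4, hne, hnh]
      by_cases h5 : PySem.Str.strip (PySem.Str.lower (PySem.List.pyGetD (pySplit (PySem.Str.strip l) ":") 0 "")) = "candidates_stress"
      · simp [lastValue_cons, PySem.List.pyGet?_zero, h5, hne, hnh]
      · simp [lastValue_cons, PySem.List.pyGet?_zero, h5, hne, hnh, h1, h2, h3, h4]
    · have hskip' : ∀ key : String, ¬ (PySem.Str.strip l ≠ "" ∧ PySem.Str.pyGet? (PySem.Str.strip l) 0 ≠ some '#' ∧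
          PySem.Str.strip (PySem.Str.lower (PySem.List.pyGetD (pySplit (PySem.Str.strip l) ":") 0 "")) = key) := by
        intro key h; exact hskip ⟨h.1, h.2.1⟩
      simp only [lastValue_cons, if_neg hskip, if_neg (hskip' _)]

-- ===== VERDICT (by name: the statement is the Claim_ definition above) =====
theorem proc_input_spec : Claim_equal_proc_input := by
  intro lines _
  unfold Spec_proc_input proc_input proc_input_alt
  rw [foldl_eq_lastValue]
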